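-- pv_equiv track=rewrite | github.com/HeoSeokYong/AlgorithmStudy | water_place.py | solution
-- ===== SOURCE A (Python) =====
-- from typing import List, Tuple, Callable
-- from collections import deque
--
-- INF = 1e8 + 1e5
--
-- def solution(N:int, K:int, waters:List[int]) -> int:
--     result = 0
--     visited = set(waters)
--     q = deque((w, 1) for w in waters)
--
--     while K and q:
--         x, c = q.popleft()
--
--         for dx in [-1, 1]:
--             nx = x + dx
--
--             if -INF <= nx <= INF and nx not in visited:
--                 result += c
--                 q.append((nx, c+1))
--                 visited.add(nx)
--                 K -= 1
--                 if K == 0: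
--                     break
--
--     return result
-- ===== SOURCE B (Python) =====
-- # Closed-form re-implementation: sort the distinct effective waters, turn the
-- # gaps between them (and to the +-INF boundary) into "ray capacities", then sum
-- # the K smallest BFS distances with arithmetic-series formulas instead of a
-- # cell-by-cell BFS.
--
-- def tri(n):
--     return n * (n + 1) // 2
--
-- def solution(N, K, waters):
--     R = 100100000  # int(1e8 + 1e5): the strip is [-R, R]
--     # waters further than R+1 from the strip can never seed a cell
--     eff = sorted(set(w for w in waters if -R - 1 <= w <= R + 1))
--     caps = []
--     if eff:
--         if eff[0] + R > 0:
--             caps.append(eff[0] + R)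
--         if R - eff[-1] > 0:
--             caps.append(R - eff[-1])
--         for a, b in zip(eff, eff[1:]):
--             g = b - a - 1
--             if (g + 1) // 2 > 0:
--                 caps.append((g + 1) // 2)
--             if g // 2 > 0:
--                 caps.append(g // 2)
--     caps.sort()
--     res = 0
--     k = K
--     floor = 0
--     m = len(caps)
--     for i in range(m):
--         c = caps[i]
--         active = m - i
--         cells = (c - floor) * active
--         if cells >= k:
--             t = k // active
--             rem = k - t * active
--             return res + active * (tri(floor + t) - tri(floor)) + rem * (floor + t + 1)
--         res += active * (tri(c) - tri(floor))
--         k -= cells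
--         floor = c
--     return res
-- ===== Notes on version B (the rewrite author's own statement) =====
-- stated objective: faster
-- what changed: Replaces the cell-by-cell multi-source BFS over the +-1e8 strip by a closed form: sort the distinct effective waters, turn boundary gaps and inter-water gaps into ray capacities, and sum the K smallest distances with arithmetic-series (triangular-number) formulas over the sorted capacities.
-- outside the precondition, e.g. on solution(0, -1, [0]): A does not finish within the time limit, B returns 0
import Mathlib
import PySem

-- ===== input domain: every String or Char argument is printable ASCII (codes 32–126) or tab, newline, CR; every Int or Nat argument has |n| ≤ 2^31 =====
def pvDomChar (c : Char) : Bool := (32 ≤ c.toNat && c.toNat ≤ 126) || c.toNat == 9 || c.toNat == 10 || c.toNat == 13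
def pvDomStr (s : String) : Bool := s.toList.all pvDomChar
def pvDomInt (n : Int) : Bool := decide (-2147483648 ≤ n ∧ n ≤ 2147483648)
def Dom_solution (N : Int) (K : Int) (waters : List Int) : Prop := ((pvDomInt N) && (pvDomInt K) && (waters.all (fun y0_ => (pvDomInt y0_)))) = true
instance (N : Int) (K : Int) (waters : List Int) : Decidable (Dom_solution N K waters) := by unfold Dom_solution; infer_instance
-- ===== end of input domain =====

set_option maxRecDepth 8000

-- B replaces A's cell-by-cell multi-source BFS by sorted gap capacities and
-- arithmetic-series formulas (asymptotically faster in K); equivalence is proved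
-- for K ≥ 0 (Pre_ below).

-- ===== PORT A =====
-- INF = 1e8 + 1e5 : the float comparisons '-INF <= nx <= INF' are exact on the
-- integers admitted by Dom (|nx| ≤ 2^31 + 1 < 2^53), so they are ported as
-- integer comparisons with 100100000.
def pvINF : Int := 100100000

-- the 'while K and q' loop; fuel only makes the recursion structural (each
-- iteration pops one entry and every appended entry marks a fresh strip cell,
-- so 'waters.length + 2*(2*INF+1) + 1' iterations always suffice)
-- Python's 'set' is used here only for O(1) membership tests and inserts
-- (its iteration order is never consumed), so it is ported exactly by
-- Std.HashSet: 'nx in visited' = visited.contains nx, visited.add(nx) = visited.insert nx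
def solutionGo (fuel : Nat) (result : Int) (K : Int) (visited : Std.HashSet Int)
    (q : List (Int × Int)) : Int :=
  match fuel with
  | 0 => result
  | fuel + 1 =>
    if K = 0 then result
    else
      match q with
      | [] => result
      | (x, c) :: q =>
        -- dx = -1
        if (-pvINF ≤ x - 1 ∧ x - 1 ≤ pvINF) ∧ ¬ visited.contains (x - 1) then
          if K - 1 = 0 then result + c   -- 'if K == 0: break', then 'while K' exits
          else
            -- dx = 1
            if (-pvINF ≤ x + 1 ∧ x + 1 ≤ pvINF) ∧
                ¬ (visited.insert (x - 1)).contains (x + 1) then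
              solutionGo fuel (result + c + c) (K - 2)
                ((visited.insert (x - 1)).insert (x + 1))
                (q ++ [(x - 1, c + 1)] ++ [(x + 1, c + 1)])
            else
              solutionGo fuel (result + c) (K - 1)
                (visited.insert (x - 1)) (q ++ [(x - 1, c + 1)])
        else
          -- dx = 1
          if (-pvINF ≤ x + 1 ∧ x + 1 ≤ pvINF) ∧ ¬ visited.contains (x + 1) then
            solutionGo fuel (result + c) (K - 1)
              (visited.insert (x + 1)) (q ++ [(x + 1, c + 1)])
          else
            solutionGo fuel result K visited q

def solution (N : Int) (K : Int) (waters : List Int) : Int :=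
  solutionGo (waters.length + 400400003) 0 K (Std.HashSet.ofList waters)
    (waters.map (fun w => (w, 1)))

-- ===== PORT B =====
def pvTri (n : Int) : Int := PySem.Int.floordiv (n * (n + 1)) 2

-- the 'for i in range(m)' scan; 'active = m - i' is the length of the unscanned
-- suffix, so the scan is recursion on that suffix
def altScan : List Int → Int → Int → Int → Int
  | [], _, res, _ => res
  | c :: rest, k, res, floor =>
    let active : Int := ((c :: rest).length : Int)
    let cells := (c - floor) * active
    if k ≤ cells then
      let t := PySem.Int.floordiv k active
      let rem := k - t * active
      res + active * (pvTri (floor + t) - pvTri floor) + rem * (floor + t + 1)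
    else
      altScan rest (k - cells) (res + active * (pvTri c - pvTri floor)) c

def altCaps (eff : List Int) : List Int :=
  match eff with
  | [] => []
  | e :: _ =>
    ((if 0 < e + pvINF then [e + pvINF] else []) ++
     (if 0 < pvINF - eff.getLastD 0 then [pvINF - eff.getLastD 0] else [])) ++
    ((eff.zip (eff.drop 1)).foldl (fun acc p =>
        let g := p.2 - p.1 - 1
        acc ++ (if 0 < PySem.Int.floordiv (g + 1) 2 then [PySem.Int.floordiv (g + 1) 2] else [])
            ++ (if 0 < PySem.Int.floordiv g 2 then [PySem.Int.floordiv g 2] else [])) [])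

def solution_alt (N : Int) (K : Int) (waters : List Int) : Int :=
  let eff := PySem.List.sorted
    (PySem.Set.ofList (waters.filter (fun w => -pvINF - 1 ≤ w ∧ w ≤ pvINF + 1)))
    (fun x => x) false
  let caps := PySem.List.sorted (altCaps eff) (fun x => x) false
  altScan caps K 0 0


-- ===== PRECONDITION & SPEC =====
-- Pre_ excludes K < 0: there 'while K' stays truthy, so A enumerates every one
-- of the ~2·10^8 cells of the ±INF strip one by one before its deque empties
-- (practically it diverges); B returns its natural value (0) there.
def Pre_solution (N : Int) (K : Int) (waters : List Int) : Prop := 0 ≤ K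
instance (N : Int) (K : Int) (waters : List Int) : Decidable (Pre_solution N K waters) := by
  unfold Pre_solution; infer_instance

def pvWitness_solution : Int × Int × List Int := (0, 3, [5, -2, 5, 100100001])

def Spec_solution (N : Int) (K : Int) (waters : List Int) (out : Int) : Prop := out = solution_alt N K waters
instance (N : Int) (K : Int) (waters : List Int) (out : Int) : Decidable (Spec_solution N K waters out) := by unfold Spec_solution; infer_instance

-- ===== CLAIM (what is proved, stated in full; the proofs are below) =====
def Claim_equal_solution : Prop := ∀ (N : Int) (K : Int) (waters : List Int), Dom_solution N K waters → Pre_solution N K waters → Spec_solution N K waters (solution N K waters)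

-- ===== LEMMAS AND PROOFS =====

-- truncated level sums: levels a, a+1, ..., a+n-1, take min(k, cnt d) cells at level d
def pvTsum (cnt : Int → Int) : Int → Nat → Int → Int
  | _, 0, _ => 0
  | a, n+1, k => min k (cnt a) * a + pvTsum cnt (a+1) n (k - min k (cnt a))

lemma pvTri_succ (n : Int) : pvTri (n + 1) = pvTri n + (n + 1) := by
  unfold pvTri
  rw [PySem.Int.floordiv_eq_ediv_of_pos (by norm_num), PySem.Int.floordiv_eq_ediv_of_pos (by norm_num)]
  have h : (n + 1) * (n + 1 + 1) = n * (n + 1) + (n + 1) * 2 := by ring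
  rw [h, Int.add_mul_ediv_right _ _ (by norm_num)]

lemma pvTsum_succ (cnt : Int → Int) (a : Int) (n : Nat) (k : Int) :
    pvTsum cnt a (n+1) k = min k (cnt a) * a + pvTsum cnt (a+1) n (k - min k (cnt a)) := rfl

lemma pvTsum_k_zero (cnt : Int → Int) (hpos : ∀ d, 0 ≤ cnt d) :
    ∀ (n : Nat) (a : Int), pvTsum cnt a n 0 = 0 := by
  intro n
  induction n with
  | zero => intro a; rfl
  | succ n ih =>
    intro a
    have hm : min 0 (cnt a) = 0 := by have := hpos a; omega
    rw [pvTsum_succ, hm]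
    simpa using ih (a+1)

lemma pvTsum_cnt_zero (cnt : Int → Int) :
    ∀ (n : Nat) (a : Int) (k : Int), 0 ≤ k → (∀ d, a ≤ d → cnt d = 0) → pvTsum cnt a n k = 0 := by
  intro n
  induction n with
  | zero => intro a k _ _; rfl
  | succ n ih =>
    intro a k hk h0
    have hm : min k (cnt a) = 0 := by have := h0 a le_rfl; omega
    rw [pvTsum_succ, hm]
    simpa using ih (a+1) k (by omega) (fun d hd => h0 d (by omega))

lemma pvTsum_congr (cnt₁ cnt₂ : Int → Int) :
    ∀ (n : Nat) (a k : Int), (∀ d, a ≤ d → d < a + n → cnt₁ d = cnt₂ d) →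
    pvTsum cnt₁ a n k = pvTsum cnt₂ a n k := by
  intro n
  induction n with
  | zero => intro a k _; rfl
  | succ n ih =>
    intro a k h
    have ha : cnt₁ a = cnt₂ a := h a le_rfl (by omega)
    rw [pvTsum_succ, pvTsum_succ, ha, ih (a+1) _ (fun d h1 h2 => h d (by omega) (by push_cast at h2 ⊢; omega))]

lemma pvTsum_full (cnt : Int → Int) (A : Int) (hA : 0 ≤ A) :
    ∀ (t : Nat) (fl : Int) (n : Nat) (k : Int),
      (∀ d, fl + 1 ≤ d → d ≤ fl + t → cnt d = A) → A * t ≤ k → t ≤ n →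
      pvTsum cnt (fl + 1) n k =
        A * (pvTri (fl + t) - pvTri fl) + pvTsum cnt (fl + t + 1) (n - t) (k - A * t) := by
  intro t
  induction t with
  | zero => intro fl n k _ _ _; simp
  | succ t ih =>
    intro fl n k hconst hk hn
    obtain ⟨n', rfl⟩ : ∃ n', n = n' + 1 := ⟨n - 1, by omega⟩
    have hca : cnt (fl + 1) = A := hconst _ le_rfl (by push_cast; omega)
    have hm : min k (cnt (fl + 1)) = A := by
      rw [hca]; have : A * (t + 1 : Nat) = A * t + A := by push_cast; ring
      have h2 : 0 ≤ A * t := by positivity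
      omega
    rw [pvTsum_succ, hm]
    have := ih (fl + 1) n' (k - A) (fun d h1 h2 => hconst d (by omega) (by push_cast at h2 ⊢; omega))
      (by push_cast at hk ⊢; nlinarith) (by omega)
    rw [this]
    have htri : pvTri (fl + 1) = pvTri fl + (fl + 1) := pvTri_succ fl
    have e1 : fl + 1 + (t : Int) = fl + ((t : Nat) + 1 : Nat) := by push_cast; ring
    have e2 : fl + 1 + (t : Int) + 1 = fl + ((t : Nat) + 1 : Nat) + 1 := by push_cast; ring
    have e3 : k - A - A * t = k - A * ((t : Nat) + 1 : Nat) := by push_cast; ring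
    have e4 : n' - t = n' + 1 - (t + 1) := by omega
    rw [e1, e3, e4, htri]; ring

lemma pvTsum_rem (cnt : Int → Int) (hpos : ∀ d, 0 ≤ cnt d) (fl : Int) (n : Nat) (rem : Int)
    (hn : 1 ≤ n) (h0 : 0 ≤ rem) (hr : rem ≤ cnt (fl + 1)) :
    pvTsum cnt (fl + 1) n rem = rem * (fl + 1) := by
  obtain ⟨n', rfl⟩ : ∃ n', n = n' + 1 := ⟨n - 1, by omega⟩
  have hm : min rem (cnt (fl + 1)) = rem := by omega
  rw [pvTsum_succ, hm]
  simp [pvTsum_k_zero cnt hpos]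

def pvCntP (caps : List Int) (d : Int) : Int := (caps.countP (fun c => d ≤ c) : Int)

lemma pvCntP_nonneg (caps : List Int) (d : Int) : 0 ≤ pvCntP caps d := by
  unfold pvCntP; positivity

lemma pvCntP_cons (c : Int) (rest : List Int) (d : Int) :
    pvCntP (c :: rest) d = (if d ≤ c then 1 else 0) + pvCntP rest d := by
  unfold pvCntP
  rw [List.countP_cons]
  by_cases h : d ≤ c <;> simp [h] <;> push_cast <;> omega

lemma pvCntP_all (c : Int) (rest : List Int) (d : Int)
    (hall : ∀ y ∈ c :: rest, d ≤ y) :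
    pvCntP (c :: rest) d = ((c :: rest).length : Int) := by
  unfold pvCntP
  rw [List.countP_eq_length.2 (fun y hy => by simpa using hall y hy)]

lemma altScan_eq : ∀ (caps : List Int) (k res floor : Int) (n : Nat),
    caps.Pairwise (· ≤ ·) → (∀ c ∈ caps, floor ≤ c) → 0 ≤ floor → 0 ≤ k →
    (∀ c ∈ caps, c ≤ floor + n) →
    altScan caps k res floor = res + pvTsum (pvCntP caps) (floor + 1) n k := by
  intro caps
  induction caps with
  | nil =>
    intro k res floor n _ _ _ hk _
    rw [pvTsum_cnt_zero _ n (floor+1) k hk (fun d _ => by simp [pvCntP])]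
    simp [altScan]
  | cons c rest ih =>
    intro k res floor n hpw hflo h0f h0k hbound
    have hcrest : ∀ y ∈ rest, c ≤ y := fun y hy => (List.pairwise_cons.1 hpw).1 y hy
    have hfc : floor ≤ c := hflo c (by simp)
    have hactive : (0:Int) < (((c :: rest).length : Nat) : Int) := by
      exact_mod_cast Nat.succ_pos rest.length
    have hcnt_const : ∀ d, floor + 1 ≤ d → d ≤ c →
        pvCntP (c :: rest) d = (((c :: rest).length : Nat) : Int) := by
      intro d _ hdc
      exact pvCntP_all c rest d (fun y hy => by
        rcases List.mem_cons.1 hy with rfl | hy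
        · exact hdc
        · exact le_trans hdc (hcrest y hy))
    have hspan : c - floor ≤ (n : Int) := by have := hbound c (by simp); omega
    rw [altScan]
    simp only
    split_ifs with hcase
    · -- k ≤ cells : final partial block
      rw [PySem.Int.floordiv_eq_ediv_of_pos hactive]
      obtain ⟨t', hT⟩ : ∃ t' : Nat, k / (((c :: rest).length : Nat) : Int) = (t' : Int) :=
        ⟨_, (Int.toNat_of_nonneg (Int.ediv_nonneg h0k (le_of_lt hactive))).symm⟩
      have hmod := Int.ediv_add_emod k (((c :: rest).length : Nat) : Int)
      rw [hT] at hmod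
      have hm0 : 0 ≤ k % (((c :: rest).length : Nat) : Int) := Int.emod_nonneg k (by omega)
      have hm1 : k % (((c :: rest).length : Nat) : Int) < (((c :: rest).length : Nat) : Int) :=
        Int.emod_lt_of_pos k hactive
      have hcells : k ≤ (c - floor) * (((c :: rest).length : Nat) : Int) := hcase
      have htle : (t' : Int) ≤ c - floor := by
        by_contra hlt
        push_neg at hlt
        have h1 : (c - floor + 1) * (((c :: rest).length : Nat) : Int) ≤
            (t' : Int) * (((c :: rest).length : Nat) : Int) :=
          mul_le_mul_of_nonneg_right (by omega) (le_of_lt hactive)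
        nlinarith
      have hfull := pvTsum_full (pvCntP (c :: rest)) (((c :: rest).length : Nat) : Int)
        (le_of_lt hactive) t' floor n k
        (fun d h1 h2 => hcnt_const d h1 (by omega))
        (by nlinarith [hmod, hm0]) (by omega)
      rw [hT, hfull]
      rcases eq_or_lt_of_le hm0 with hz | hpos
      · -- rem = 0
        have hk1 : k - (((c :: rest).length : Nat) : Int) * (t' : Int) = 0 := by omega
        have hk2 : k - (t' : Int) * (((c :: rest).length : Nat) : Int) = 0 := by
          rw [mul_comm]; omega
        rw [hk1, pvTsum_k_zero _ (pvCntP_nonneg (c :: rest)), hk2]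
        ring
      · -- rem > 0 : one extra partial level
        have htlt : (t' : Int) < c - floor := by
          rcases eq_or_lt_of_le htle with heq | h
          · exfalso; nlinarith
          · exact h
        have hk1 : k - (((c :: rest).length : Nat) : Int) * (t' : Int) =
            k % (((c :: rest).length : Nat) : Int) := by omega
        have hk2 : k - (t' : Int) * (((c :: rest).length : Nat) : Int) =
            k % (((c :: rest).length : Nat) : Int) := by rw [mul_comm]; omega
        have hlast := pvTsum_rem (pvCntP (c :: rest)) (pvCntP_nonneg (c :: rest))
          (floor + (t' : Int)) (n - t') (k % (((c :: rest).length : Nat) : Int))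
          (by omega) hm0
          (by rw [hcnt_const (floor + (t' : Int) + 1) (by omega) (by omega)]; omega)
        rw [hk1, hlast, hk2]
        ring
    · -- cells < k : full block for this cap, recurse on rest
      push_neg at hcase
      obtain ⟨span, hsp⟩ : ∃ span : Nat, c - floor = (span : Int) :=
        ⟨_, (Int.toNat_of_nonneg (by omega)).symm⟩
      have hrec := ih (k - (c - floor) * (((c :: rest).length : Nat) : Int))
        (res + (((c :: rest).length : Nat) : Int) * (pvTri c - pvTri floor)) c
        (n - span) ((List.pairwise_cons.1 hpw).2) hcrest (by omega)
        (by nlinarith) (by intro y hy; have := hbound y (by simp [hy]); push_cast; omega)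
      rw [hrec]
      have hfull := pvTsum_full (pvCntP (c :: rest)) (((c :: rest).length : Nat) : Int)
        (le_of_lt hactive) span floor n k
        (fun d h1 h2 => hcnt_const d h1 (by omega))
        (by nlinarith [hcase]) (by omega)
      have hc1 : floor + (span : Int) = c := by omega
      rw [hfull, hc1]
      have hk1 : k - (((c :: rest).length : Nat) : Int) * (span : Int) =
          k - (c - floor) * (((c :: rest).length : Nat) : Int) := by
        rw [hsp, mul_comm]
      rw [hk1]
      have hcong : pvTsum (pvCntP (c :: rest)) (c + 1) (n - span)
            (k - (c - floor) * (((c :: rest).length : Nat) : Int)) =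
          pvTsum (pvCntP rest) (c + 1) (n - span)
            (k - (c - floor) * (((c :: rest).length : Nat) : Int)) := by
        apply pvTsum_congr
        intro d hd _
        rw [pvCntP_cons, if_neg (by omega)]
        ring
      rw [hcong]
      ring

-- ===== geometry: distance function and level counts =====
def pvDmin (x : Int) : List Int → Int
  | [] => 0
  | [e] => |x - e|
  | e :: f :: rest =>
    if |x - e| ≤ pvDmin x (f :: rest) then |x - e| else pvDmin x (f :: rest)

def pvCIcc (lo hi : Int) (es : List Int) (d : Int) : Int :=
  ((PySem.List.pyRange lo (hi + 1) 1).countP (fun x => decide (x ∉ es ∧ pvDmin x es = d)) : Int)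

def pvCapsOf (lo : Int) : List Int → Int → List Int
  | [], _ => []
  | [e], hi => [e - lo, hi - e]
  | e₁ :: e₂ :: rest, hi =>
    (e₁ - lo) :: (e₁ + (e₂ - e₁) / 2 - e₁) :: pvCapsOf (e₁ + (e₂ - e₁) / 2 + 1) (e₂ :: rest) hi

lemma pvDmin_cons (x e f : Int) (rest : List Int) :
    pvDmin x (e :: f :: rest) = min (|x - e|) (pvDmin x (f :: rest)) := by
  rw [min_def]; rfl

lemma pvDmin_le (x : Int) : ∀ (es : List Int) (e : Int), e ∈ es → pvDmin x es ≤ |x - e| := by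
  intro es
  induction es with
  | nil => intro e h; simp at h
  | cons a tail ih =>
    intro e he
    match tail with
    | [] => simp at he; subst he; simp [pvDmin]
    | f :: rest =>
      rw [pvDmin_cons]
      rcases List.mem_cons.1 he with rfl | hm
      · exact min_le_left _ _
      · exact le_trans (min_le_right _ _) (ih e hm)

lemma pvDmin_mem (x : Int) : ∀ (es : List Int), es ≠ [] → ∃ e ∈ es, pvDmin x es = |x - e| := by
  intro es
  induction es with
  | nil => intro h; simp at h
  | cons a tail ih =>
    intro _
    match tail with
    | [] => exact ⟨a, by simp, rfl⟩
    | f :: rest =>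
      rw [pvDmin_cons]
      rcases le_total (|x - a|) (pvDmin x (f :: rest)) with h | h
      · exact ⟨a, by simp, min_eq_left h⟩
      · obtain ⟨e, he, heq⟩ := ih (by simp)
        exact ⟨e, by simp [he], by rw [min_eq_right h, heq]⟩

lemma pvDmin_nonneg (x : Int) (es : List Int) (h : es ≠ []) : 0 ≤ pvDmin x es := by
  obtain ⟨e, _, heq⟩ := pvDmin_mem x es h
  rw [heq]; positivity

lemma pvDmin_eq_zero (x : Int) (es : List Int) (hx : x ∈ es) : pvDmin x es = 0 := by
  have h1 := pvDmin_le x es x hx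
  have h2 := pvDmin_nonneg x es (by rintro rfl; simp at hx)
  simp at h1; omega

-- |pvDmin| changes by at most 1 between neighbours
lemma pvDmin_adj (x y : Int) (es : List Int) (h : es ≠ []) (hadj : y = x - 1 ∨ y = x + 1) :
    pvDmin x es - 1 ≤ pvDmin y es ∧ pvDmin y es ≤ pvDmin x es + 1 := by
  constructor
  · obtain ⟨e, he, heq⟩ := pvDmin_mem y es h
    have := pvDmin_le x es e he
    rw [heq]
    have : |x - e| ≤ |y - e| + 1 := by
      rcases hadj with rfl | rfl <;> simp only [Int.abs_eq_natAbs] <;> omega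
    omega
  · obtain ⟨e, he, heq⟩ := pvDmin_mem x es h
    have h2 := pvDmin_le y es e he
    have : |y - e| ≤ |x - e| + 1 := by
      rcases hadj with rfl | rfl <;> simp only [Int.abs_eq_natAbs] <;> omega
    omega

-- generic counting helpers
lemma countP_split_pq (p q : Int → Bool) : ∀ (l : List Int),
    l.countP (fun x => p x && q x) + l.countP (fun x => p x && !q x) = l.countP p := by
  intro l
  induction l with
  | nil => rfl
  | cons a l ih =>
    rw [List.countP_cons, List.countP_cons, List.countP_cons]
    cases hp : p a <;> cases hq : q a <;> simp [hp, hq] <;> omega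

lemma countP_eq_single_not_mem (v : Int) (l : List Int) (hv : v ∉ l) :
    l.countP (fun x => x == v) = 0 := by
  apply List.countP_eq_zero.2
  intro x hx
  have : x ≠ v := by rintro rfl; exact hv hx
  simp [this]

lemma countP_eq_single (v : Int) : ∀ (l : List Int), l.Nodup → v ∈ l →
    l.countP (fun x => x == v) = 1 := by
  intro l
  induction l with
  | nil => intro _ h; simp at h
  | cons a l ih =>
    intro hnd hv
    rw [List.countP_cons]
    by_cases hva : v = a
    · subst hva
      rw [countP_eq_single_not_mem v l (List.nodup_cons.1 hnd).1]
      simp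
    · have hm : v ∈ l := by
        rcases List.mem_cons.1 hv with h | h
        · exact absurd h hva
        · exact h
      rw [ih (List.nodup_cons.1 hnd).2 hm]
      have : a ≠ v := fun h => hva h.symm
      simp [this]

lemma countP_congr_mem (p q : Int → Bool) : ∀ (l : List Int), (∀ x ∈ l, p x = q x) →
    l.countP p = l.countP q := by
  intro l
  induction l with
  | nil => intro _; rfl
  | cons a l ih =>
    intro h
    rw [List.countP_cons, List.countP_cons, h a (by simp), ih (fun x hx => h x (by simp [hx]))]

lemma countP_or_disjoint (p q : Int → Bool) : ∀ (l : List Int), (∀ x, ¬(p x = true ∧ q x = true)) →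
    l.countP (fun x => p x || q x) = l.countP p + l.countP q := by
  intro l hdis
  induction l with
  | nil => rfl
  | cons a l ih =>
    rw [List.countP_cons, List.countP_cons, List.countP_cons, ih]
    cases hp : p a
    · cases hq : q a
      · simp [hp, hq]
      · simp [hp, hq]
        omega
    · cases hq : q a
      · simp [hp, hq]
        omega
      · exact absurd ⟨hp, hq⟩ (hdis a)

lemma pvCIcc_single (lo hi e d : Int) (hd : 1 ≤ d) (hlo : lo - 1 ≤ e) (hhi : e ≤ hi + 1) :
    pvCIcc lo hi [e] d = (if d ≤ e - lo then 1 else 0) + (if d ≤ hi - e then 1 else 0) := by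
  unfold pvCIcc
  have hcongr : (PySem.List.pyRange lo (hi+1) 1).countP (fun x => decide (x ∉ [e] ∧ pvDmin x [e] = d))
      = (PySem.List.pyRange lo (hi+1) 1).countP (fun x => (x == e - d) || (x == e + d)) := by
    apply countP_congr_mem
    intro x _
    have hiff : (x ∉ [e] ∧ pvDmin x [e] = d) ↔ (x = e - d ∨ x = e + d) := by
      show (¬ x ∈ [e] ∧ |x - e| = d) ↔ _
      simp only [List.mem_singleton, Int.abs_eq_natAbs]
      omega
    rw [show ((x == e - d) || (x == e + d)) = decide (x = e - d ∨ x = e + d) from by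
      by_cases h1 : x = e - d <;> by_cases h2 : x = e + d <;> simp [h1, h2]]
    exact decide_eq_decide.2 hiff
  rw [hcongr, countP_or_disjoint _ _ _ (by
    intro x ⟨h1, h2⟩
    simp only [beq_iff_eq] at h1 h2
    omega)]
  have hone : ∀ v : Int, (PySem.List.pyRange lo (hi+1) 1).countP (fun x => x == v) =
      if lo ≤ v ∧ v ≤ hi then 1 else 0 := by
    intro v
    split_ifs with hv
    · exact countP_eq_single v _ (PySem.List.nodup_pyRange_one lo (hi+1))
        (PySem.List.mem_pyRange_one.2 ⟨hv.1, by omega⟩)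
    · exact countP_eq_single_not_mem v _ (fun hm => hv (by
        have := PySem.List.mem_pyRange_one.1 hm; omega))
  rw [hone, hone]
  push_cast
  split_ifs <;> omega

lemma pvCIcc_caps : ∀ (es : List Int) (lo hi d : Int), es ≠ [] → es.Pairwise (· < ·) →
    1 ≤ d → (∀ e ∈ es, lo - 1 ≤ e ∧ e ≤ hi + 1) →
    pvCIcc lo hi es d = pvCntP (pvCapsOf lo es hi) d := by
  intro es
  induction es with
  | nil => intro lo hi d h; exact absurd rfl h
  | cons a tail ih =>
    intro lo hi d _ hpw hd hbnd
    match tail with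
    | [] =>
      show pvCIcc lo hi [a] d = pvCntP [a - lo, hi - a] d
      rw [pvCIcc_single lo hi a d hd (hbnd a (by simp)).1 (hbnd a (by simp)).2,
        pvCntP_cons, pvCntP_cons]
      simp [pvCntP]
    | b :: rest =>
      have hab : a < b := (List.pairwise_cons.1 hpw).1 b (by simp)
      have htailge : ∀ y ∈ b :: rest, b ≤ y := by
        intro y hy
        rcases List.mem_cons.1 hy with rfl | hm
        · exact le_refl y
        · exact le_of_lt ((List.pairwise_cons.1 (List.pairwise_cons.1 hpw).2).1 y hm)
      have hdiv := Int.ediv_add_emod (b - a) 2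
      have hm0 : 0 ≤ (b - a) % 2 := Int.emod_nonneg _ (by norm_num)
      have hm1 : (b - a) % 2 < 2 := Int.emod_lt_of_pos _ (by norm_num)
      have hq0 : 0 ≤ (b - a) / 2 := Int.ediv_nonneg (by omega) (by norm_num)
      set q := (b - a) / 2 with hqdef
      have hmidb : a + q < b := by omega
      have hba : lo - 1 ≤ a := (hbnd a (by simp)).1
      have hbhi : b ≤ hi + 1 := (hbnd b (by simp)).2
      have hsplit := PySem.List.pyRange_one_append lo (a + q + 1) (hi + 1)
        (by omega) (by omega)
      unfold pvCIcc
      rw [hsplit, List.countP_append]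
      have hleft : (PySem.List.pyRange lo (a + q + 1) 1).countP
            (fun x => decide (x ∉ a :: b :: rest ∧ pvDmin x (a :: b :: rest) = d))
          = (PySem.List.pyRange lo (a + q + 1) 1).countP
            (fun x => decide (x ∉ [a] ∧ pvDmin x [a] = d)) := by
        apply countP_congr_mem
        intro x hx
        have hxr := PySem.List.mem_pyRange_one.1 hx
        apply decide_eq_decide.2
        have hnot : x ∉ b :: rest := fun hm => by have := htailge x hm; omega
        have hdm : pvDmin x (a :: b :: rest) = |x - a| := by
          rw [pvDmin_cons]
          obtain ⟨e', he', heq⟩ := pvDmin_mem x (b :: rest) (by simp)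
          have hge := htailge e' he'
          have hminle : |x - a| ≤ pvDmin x (b :: rest) := by
            rw [heq]
            simp only [Int.abs_eq_natAbs]
            omega
          exact min_eq_left hminle
        rw [hdm]
        simp only [List.mem_cons, List.not_mem_nil, or_false]
        constructor
        · intro ⟨h1, h2⟩
          exact ⟨fun he => h1 (Or.inl he), h2⟩
        · intro ⟨h1, h2⟩
          refine ⟨fun hc => ?_, h2⟩
          rcases hc with he | hm
          · exact h1 he
          · exact hnot (List.mem_cons.2 hm)
      have hright : (PySem.List.pyRange (a + q + 1) (hi + 1) 1).countP
            (fun x => decide (x ∉ a :: b :: rest ∧ pvDmin x (a :: b :: rest) = d))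
          = (PySem.List.pyRange (a + q + 1) (hi + 1) 1).countP
            (fun x => decide (x ∉ b :: rest ∧ pvDmin x (b :: rest) = d)) := by
        apply countP_congr_mem
        intro x hx
        have hxr := PySem.List.mem_pyRange_one.1 hx
        apply decide_eq_decide.2
        have hxa : a < x := by omega
        have hdm : pvDmin x (a :: b :: rest) = pvDmin x (b :: rest) := by
          rw [pvDmin_cons]
          have hle : pvDmin x (b :: rest) ≤ |x - a| := by
            have h1 := pvDmin_le x (b :: rest) b (by simp)
            simp only [Int.abs_eq_natAbs] at h1 ⊢
            omega
          exact min_eq_right hle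
        rw [hdm]
        simp only [List.mem_cons]
        constructor
        · intro ⟨h1, h2⟩
          exact ⟨fun hm => h1 (Or.inr hm), h2⟩
        · intro ⟨h1, h2⟩
          refine ⟨fun hc => ?_, h2⟩
          rcases hc with rfl | hm
          · omega
          · exact h1 hm
      rw [hleft, hright]
      have h2 := pvCIcc_single lo (a + q) a d hd hba (by omega)
      unfold pvCIcc at h2
      rw [show a + q - a = q from by ring] at h2
      have hR := ih (a + q + 1) hi d (by simp) (List.pairwise_cons.1 hpw).2 hd
        (fun e he => ⟨by have := htailge e he; omega, (hbnd e (by simp [he])).2⟩)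
      unfold pvCIcc at hR
      push_cast
      push_cast at h2 hR
      rw [h2, hR]
      show _ = pvCntP ((a - lo) :: (a + (b - a) / 2 - a) :: pvCapsOf (a + (b - a) / 2 + 1) (b :: rest) hi) d
      rw [show a + (b - a) / 2 - a = q from by rw [← hqdef]; ring,
          show a + (b - a) / 2 + 1 = a + q + 1 from by rw [← hqdef],
          pvCntP_cons, pvCntP_cons]
      ring

-- ===== bridges: the port's capacity list counts the same levels =====
def pvEff (waters : List Int) : List Int :=
  PySem.List.sorted
    (PySem.Set.ofList (waters.filter (fun w => -pvINF - 1 ≤ w ∧ w ≤ pvINF + 1)))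
    (fun x => x) false

def pvGapSum : List Int → Int → Int
  | [], _ => 0
  | [_], _ => 0
  | a :: b :: rest, d =>
    (if d ≤ (b - a) / 2 then 1 else 0) + (if d ≤ (b - a - 1) / 2 then 1 else 0) +
      pvGapSum (b :: rest) d

lemma mem_pvEff (waters : List Int) (x : Int) :
    x ∈ pvEff waters ↔ x ∈ waters ∧ -pvINF - 1 ≤ x ∧ x ≤ pvINF + 1 := by
  unfold pvEff
  rw [PySem.List.mem_sorted, PySem.Set.mem_ofList, List.mem_filter]
  simp

lemma pvEff_pairwise (waters : List Int) : (pvEff waters).Pairwise (· < ·) :=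
  PySem.List.sorted_ofList_pairwise_lt _

lemma pvCntP_capsOf : ∀ (tail : List Int) (a lo hi d : Int),
    pvCntP (pvCapsOf lo (a :: tail) hi) d =
      (if d ≤ a - lo then 1 else 0) + (if d ≤ hi - tail.getLastD a then 1 else 0) +
        pvGapSum (a :: tail) d := by
  intro tail
  induction tail with
  | nil =>
    intro a lo hi d
    show pvCntP [a - lo, hi - a] d = _
    rw [pvCntP_cons, pvCntP_cons]
    simp [pvCntP, pvGapSum]
  | cons b rest ih =>
    intro a lo hi d
    show pvCntP ((a - lo) :: (a + (b - a) / 2 - a) :: pvCapsOf (a + (b - a) / 2 + 1) (b :: rest) hi) d = _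
    rw [pvCntP_cons, pvCntP_cons, ih b (a + (b - a) / 2 + 1) hi d]
    have hdiv := Int.ediv_add_emod (b - a) 2
    have hm0 : 0 ≤ (b - a) % 2 := Int.emod_nonneg _ (by norm_num)
    have hm1 : (b - a) % 2 < 2 := Int.emod_lt_of_pos _ (by norm_num)
    have hdiv2 := Int.ediv_add_emod (b - a - 1) 2
    have hn0 : 0 ≤ (b - a - 1) % 2 := Int.emod_nonneg _ (by norm_num)
    have hn1 : (b - a - 1) % 2 < 2 := Int.emod_lt_of_pos _ (by norm_num)
    have e1 : a + (b - a) / 2 - a = (b - a) / 2 := by ring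
    have e2 : b - (a + (b - a) / 2 + 1) = (b - a - 1) / 2 := by omega
    rw [e1, e2]
    show _ = _ + _ + pvGapSum (a :: b :: rest) d
    rw [show pvGapSum (a :: b :: rest) d =
      (if d ≤ (b - a) / 2 then 1 else 0) + (if d ≤ (b - a - 1) / 2 then 1 else 0) +
        pvGapSum (b :: rest) d from rfl]
    rw [List.getLastD_cons]
    ring

lemma foldl_append2 {α : Type} (f g : α → List Int) :
    ∀ (l : List α) (acc : List Int),
      l.foldl (fun acc p => acc ++ f p ++ g p) acc = acc ++ l.flatMap (fun p => f p ++ g p) := by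
  intro l
  induction l with
  | nil => intro acc; simp
  | cons p l ih =>
    intro acc
    rw [List.foldl_cons, ih, List.flatMap_cons]
    simp

lemma pvCntP_append (l1 l2 : List Int) (d : Int) :
    pvCntP (l1 ++ l2) d = pvCntP l1 d + pvCntP l2 d := by
  unfold pvCntP
  rw [List.countP_append]
  push_cast
  ring

lemma pvCntP_gapflat (d : Int) (hd : 1 ≤ d) :
    ∀ (tail : List Int) (a : Int),
      pvCntP (((a :: tail).zip tail).flatMap (fun p =>
        (if 0 < PySem.Int.floordiv (p.2 - p.1 - 1 + 1) 2 then [PySem.Int.floordiv (p.2 - p.1 - 1 + 1) 2] else []) ++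
        (if 0 < PySem.Int.floordiv (p.2 - p.1 - 1) 2 then [PySem.Int.floordiv (p.2 - p.1 - 1) 2] else []))) d
      = pvGapSum (a :: tail) d := by
  intro tail
  induction tail with
  | nil => intro a; simp [pvCntP, pvGapSum]
  | cons b rest ih =>
    intro a
    rw [show (a :: b :: rest).zip (b :: rest) = (a, b) :: ((b :: rest).zip rest) from rfl,
      List.flatMap_cons, pvCntP_append, ih b]
    show pvCntP (_ ++ _) d + _ = _
    rw [pvCntP_append]
    rw [show pvGapSum (a :: b :: rest) d =
      (if d ≤ (b - a) / 2 then 1 else 0) + (if d ≤ (b - a - 1) / 2 then 1 else 0) +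
        pvGapSum (b :: rest) d from rfl]
    have hf1 : PySem.Int.floordiv (b - a - 1 + 1) 2 = (b - a) / 2 := by
      rw [show b - a - 1 + 1 = b - a from by ring]
      exact PySem.Int.floordiv_eq_ediv_of_pos (by norm_num)
    have hf2 : PySem.Int.floordiv (b - a - 1) 2 = (b - a - 1) / 2 := by
      exact PySem.Int.floordiv_eq_ediv_of_pos (by norm_num)
    rw [hf1, hf2]
    have hind : ∀ c : Int, pvCntP (if 0 < c then [c] else []) d = if d ≤ c then 1 else 0 := by
      intro c
      split_ifs with h1 h2 h2
      · rw [pvCntP_cons]; simp [pvCntP, h2]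
      · rw [pvCntP_cons]; simp [pvCntP, h2]
      · omega
      · simp [pvCntP]
    rw [hind, hind]

def pvCnt (waters : List Int) (d : Int) : Int :=
  ((PySem.List.pyRange (-pvINF) (pvINF + 1) 1).countP
    (fun y => decide (y ∉ waters ∧ pvDmin y (pvEff waters) = d)) : Int)

lemma pvCnt_nonneg (waters : List Int) (d : Int) : 0 ≤ pvCnt waters d := by
  unfold pvCnt; positivity

lemma pvCntP_altCaps (a : Int) (tail : List Int) (d : Int) (hd : 1 ≤ d) :
    pvCntP (altCaps (a :: tail)) d =
      (if d ≤ a + pvINF then 1 else 0) + (if d ≤ pvINF - tail.getLastD a then 1 else 0) +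
        pvGapSum (a :: tail) d := by
  show pvCntP (((if 0 < a + pvINF then [a + pvINF] else []) ++
     (if 0 < pvINF - (a :: tail).getLastD 0 then [pvINF - (a :: tail).getLastD 0] else [])) ++
    (((a :: tail).zip ((a :: tail).drop 1)).foldl (fun acc p =>
        acc ++ (if 0 < PySem.Int.floordiv (p.2 - p.1 - 1 + 1) 2 then [PySem.Int.floordiv (p.2 - p.1 - 1 + 1) 2] else [])
            ++ (if 0 < PySem.Int.floordiv (p.2 - p.1 - 1) 2 then [PySem.Int.floordiv (p.2 - p.1 - 1) 2] else [])) [])) d = _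
  rw [foldl_append2, List.nil_append, pvCntP_append, pvCntP_append]
  rw [show (a :: tail).drop 1 = tail from rfl]
  rw [pvCntP_gapflat d hd tail a]
  have hind : ∀ c : Int, pvCntP (if 0 < c then [c] else []) d = if d ≤ c then 1 else 0 := by
    intro c
    split_ifs with h1 h2 h2
    · rw [pvCntP_cons]; simp [pvCntP, h2]
    · rw [pvCntP_cons]; simp [pvCntP, h2]
    · omega
    · simp [pvCntP]
  rw [hind, hind, show (a :: tail).getLastD 0 = tail.getLastD a from List.getLastD_cons]

lemma pvCnt_eq_caps (waters : List Int) (a : Int) (tail : List Int)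
    (heff : pvEff waters = a :: tail) (d : Int) (hd : 1 ≤ d) :
    pvCnt waters d = pvCntP (altCaps (pvEff waters)) d := by
  have hbnd : ∀ e ∈ pvEff waters, -pvINF - 1 ≤ e ∧ e ≤ pvINF + 1 := by
    intro e he
    have := (mem_pvEff waters e).1 he
    exact ⟨this.2.1, this.2.2⟩
  have h1 : pvCnt waters d = pvCIcc (-pvINF) pvINF (pvEff waters) d := by
    have hraw : (PySem.List.pyRange (-pvINF) (pvINF + 1) 1).countP
          (fun y => decide (y ∉ waters ∧ pvDmin y (pvEff waters) = d)) =
        (PySem.List.pyRange (-pvINF) (pvINF + 1) 1).countP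
          (fun y => decide (y ∉ pvEff waters ∧ pvDmin y (pvEff waters) = d)) := by
      apply countP_congr_mem
      intro x hx
      have hxr := PySem.List.mem_pyRange_one.1 hx
      apply decide_eq_decide.2
      have hmem : x ∈ waters ↔ x ∈ pvEff waters := by
        rw [mem_pvEff]
        constructor
        · intro h; exact ⟨h, by omega, by omega⟩
        · intro h; exact h.1
      rw [hmem]
    unfold pvCnt pvCIcc
    rw [hraw]
  rw [h1, pvCIcc_caps (pvEff waters) (-pvINF) pvINF d (by rw [heff]; simp)
    (pvEff_pairwise waters) hd
    (fun e he => ⟨by have := hbnd e he; omega, by have := hbnd e he; omega⟩)]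
  rw [heff, pvCntP_capsOf tail a (-pvINF) pvINF d, pvCntP_altCaps a tail d hd,
    show a - -pvINF = a + pvINF from by ring]

lemma pvCntP_perm (l1 l2 : List Int) (h : l1.Perm l2) (d : Int) : pvCntP l1 d = pvCntP l2 d := by
  unfold pvCntP
  rw [h.countP_eq]

lemma altCaps_bounds (es : List Int) (hbnd : ∀ e ∈ es, -pvINF - 1 ≤ e ∧ e ≤ pvINF + 1) :
    ∀ c ∈ altCaps es, 0 < c ∧ c ≤ 2 * pvINF + 1 := by
  intro c hc
  match es with
  | [] => simp [altCaps] at hc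
  | a :: tail =>
    have hdiv_bound : ∀ X : Int, 0 < PySem.Int.floordiv X 2 → X ≤ 2 * pvINF + 2 →
        0 < PySem.Int.floordiv X 2 ∧ PySem.Int.floordiv X 2 ≤ 2 * pvINF + 1 := by
      intro X hpos hX
      rw [PySem.Int.floordiv_eq_ediv_of_pos (by norm_num)] at hpos ⊢
      refine ⟨hpos, ?_⟩
      have h1 : X / 2 ≤ (2 * pvINF + 2) / 2 := Int.ediv_le_ediv (by norm_num) hX
      have h2 : (2 * pvINF + 2) / 2 = pvINF + 1 := by norm_num [pvINF]
      rw [h2] at h1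
      norm_num [pvINF] at h1 ⊢
      omega
    unfold altCaps at hc
    rw [foldl_append2] at hc
    simp only [List.nil_append, List.mem_append] at hc
    rcases hc with (hc | hc) | hc
    · split_ifs at hc with h
      · simp only [List.mem_singleton] at hc
        subst hc
        have := hbnd a (by simp)
        exact ⟨h, by omega⟩
      · simp at hc
    · split_ifs at hc with h
      · simp only [List.mem_singleton] at hc
        have hgl : (a :: tail).getLastD 0 = tail.getLastD a := List.getLastD_cons
        rw [hgl] at hc h
        subst hc
        have := hbnd (tail.getLastD a) (List.getLastD_mem_cons ..)
        exact ⟨h, by omega⟩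
      · simp at hc
    · rw [List.mem_flatMap] at hc
      obtain ⟨p, hp, hcp⟩ := hc
      have hpe := List.of_mem_zip hp
      have hb1 := hbnd p.1 hpe.1
      have hb2 := hbnd p.2 (List.mem_of_mem_drop hpe.2)
      rw [List.mem_append] at hcp
      rcases hcp with h | h
      · split_ifs at h with hpos
        · simp only [List.mem_singleton] at h
          subst h
          exact hdiv_bound _ hpos (by omega)
        · simp at h
      · split_ifs at h with hpos
        · simp only [List.mem_singleton] at h
          subst h
          exact hdiv_bound _ hpos (by omega)
        · simp at h

lemma solution_alt_empty (N K : Int) (waters : List Int) (heff : pvEff waters = []) :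
    solution_alt N K waters = 0 := by
  show altScan (PySem.List.sorted (altCaps (pvEff waters)) (fun x => x) false) K 0 0 = 0
  rw [heff]
  rfl

lemma solution_alt_eq (N K : Int) (waters : List Int) (hK : 0 ≤ K) (a : Int) (tail : List Int)
    (heff : pvEff waters = a :: tail) :
    solution_alt N K waters = pvTsum (pvCnt waters) 1 200200001 K := by
  show altScan (PySem.List.sorted (altCaps (pvEff waters)) (fun x => x) false) K 0 0 = _
  have hbnd : ∀ e ∈ pvEff waters, -pvINF - 1 ≤ e ∧ e ≤ pvINF + 1 := by
    intro e he
    have := (mem_pvEff waters e).1 he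
    exact ⟨this.2.1, this.2.2⟩
  have hcb := altCaps_bounds (pvEff waters) hbnd
  have hmemS : ∀ c ∈ PySem.List.sorted (altCaps (pvEff waters)) (fun x => x) false,
      0 < c ∧ c ≤ 2 * pvINF + 1 := by
    intro c hcs
    exact hcb c ((PySem.List.mem_sorted _ _ _ _).1 hcs)
  have hpw : (PySem.List.sorted (altCaps (pvEff waters)) (fun x => x) false).Pairwise (· ≤ ·) := by
    have := PySem.List.sorted_pairwise (altCaps (pvEff waters)) (fun x => x) 
    exact this
  rw [altScan_eq _ K 0 0 200200001 hpw
    (fun c hcs => le_of_lt (hmemS c hcs).1) le_rfl hK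
    (fun c hcs => by have := (hmemS c hcs).2; norm_num [pvINF] at this ⊢; omega)]
  rw [zero_add, zero_add]
  apply pvTsum_congr
  intro d hd _
  rw [pvCntP_perm _ _ (PySem.List.sorted_perm (altCaps (pvEff waters)) (fun x => x) false) d]
  exact (pvCnt_eq_caps waters a tail heff d hd).symm

-- ===== BFS side =====
lemma pvSet_contains_iff (s : Std.HashSet Int) (x : Int) : s.contains x = true ↔ x ∈ s :=
  Std.HashSet.contains_iff_mem

lemma pvSet_mem_add (s : Std.HashSet Int) (y x : Int) :
    x ∈ s.insert y ↔ x ∈ s ∨ x = y := by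
  rw [Std.HashSet.mem_insert, beq_iff_eq]
  constructor
  · rintro (rfl | h)
    · exact Or.inr rfl
    · exact Or.inl h
  · rintro (h | rfl)
    · exact Or.inr h
    · exact Or.inl rfl

def pvUnvis (V : Std.HashSet Int) : Int :=
  ((PySem.List.pyRange (-pvINF) (pvINF + 1) 1).countP (fun y => decide (y ∉ V)) : Int)

def pvRem (waters : List Int) (d : Int) (P : List Int) : Int :=
  ((PySem.List.pyRange (-pvINF) (pvINF + 1) 1).countP
    (fun y => decide ((y ∉ waters ∧ pvDmin y (pvEff waters) = d) ∧ y ∉ P)) : Int)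

def pvPart (waters : List Int) (d : Int) (P : List Int) (k : Int) : Int :=
  min k (pvRem waters d P) * d +
    pvTsum (pvCnt waters) (d + 1) ((2 * pvINF + 1 - d).toNat) (k - min k (pvRem waters d P))

lemma pvUnvis_nonneg (V : Std.HashSet Int) : 0 ≤ pvUnvis V := by unfold pvUnvis; positivity

lemma pvRem_nonneg (waters : List Int) (d : Int) (P : List Int) : 0 ≤ pvRem waters d P := by
  unfold pvRem; positivity

lemma pvUnvis_le (V : Std.HashSet Int) : pvUnvis V ≤ 200200001 := by
  unfold pvUnvis
  have h := List.countP_le_length (l := PySem.List.pyRange (-pvINF) (pvINF + 1) 1)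
    (p := fun y => decide (y ∉ V))
  have hlen : (PySem.List.pyRange (-pvINF) (pvINF + 1) 1).length = 200200001 := by
    rw [PySem.List.length_pyRange_one]
    norm_num [pvINF]
    rfl
  omega

lemma pvRem_nil (waters : List Int) (d : Int) : pvRem waters d [] = pvCnt waters d := by
  unfold pvRem pvCnt
  have hraw : (PySem.List.pyRange (-pvINF) (pvINF + 1) 1).countP
        (fun y => decide ((y ∉ waters ∧ pvDmin y (pvEff waters) = d) ∧ y ∉ ([] : List Int)))
      = (PySem.List.pyRange (-pvINF) (pvINF + 1) 1).countP
        (fun y => decide (y ∉ waters ∧ pvDmin y (pvEff waters) = d)) := by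
    apply countP_congr_mem
    intro y _
    apply decide_eq_decide.2
    simp
  rw [hraw]

-- removing a freshly claimed cell from the remaining level count
lemma pvRem_insert (waters : List Int) (d : Int) (P : List Int) (nx : Int)
    (hstrip : -pvINF ≤ nx ∧ nx ≤ pvINF)
    (hpred : nx ∉ waters ∧ pvDmin nx (pvEff waters) = d) (hnp : nx ∉ P) :
    pvRem waters d (nx :: P) + 1 = pvRem waters d P := by
  unfold pvRem
  have hsplit := countP_split_pq
    (fun y => decide ((y ∉ waters ∧ pvDmin y (pvEff waters) = d) ∧ y ∉ P))
    (fun y => !(y == nx))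
    (PySem.List.pyRange (-pvINF) (pvINF + 1) 1)
  have h1 : (PySem.List.pyRange (-pvINF) (pvINF + 1) 1).countP
        (fun y => decide ((y ∉ waters ∧ pvDmin y (pvEff waters) = d) ∧ y ∉ P) && !(y == nx))
      = (PySem.List.pyRange (-pvINF) (pvINF + 1) 1).countP
        (fun y => decide ((y ∉ waters ∧ pvDmin y (pvEff waters) = d) ∧ y ∉ nx :: P)) := by
    apply countP_congr_mem
    intro y _
    by_cases hy : y = nx
    · subst hy
      simp [hnp, hpred.1, hpred.2]
    · by_cases hP : y ∈ P <;> by_cases hw : (y ∉ waters ∧ pvDmin y (pvEff waters) = d) <;>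
        simp [hy, hP, hw]
  have h2 : (PySem.List.pyRange (-pvINF) (pvINF + 1) 1).countP
        (fun y => decide ((y ∉ waters ∧ pvDmin y (pvEff waters) = d) ∧ y ∉ P) && !(!(y == nx)))
      = (PySem.List.pyRange (-pvINF) (pvINF + 1) 1).countP (fun y => y == nx) := by
    apply countP_congr_mem
    intro y _
    by_cases hy : y = nx
    · subst hy
      simp [hnp, hpred.1, hpred.2]
    · simp [hy]
  have h3 : (PySem.List.pyRange (-pvINF) (pvINF + 1) 1).countP (fun y => y == nx) = 1 :=
    countP_eq_single nx _ (PySem.List.nodup_pyRange_one _ _)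
      (PySem.List.mem_pyRange_one.2 ⟨hstrip.1, by omega⟩)
  rw [h1, h2, h3] at hsplit
  push_cast
  omega

lemma pvUnvis_insert (V : Std.HashSet Int) (nx : Int)
    (hstrip : -pvINF ≤ nx ∧ nx ≤ pvINF) (hnV : nx ∉ V) :
    pvUnvis (V.insert nx) + 1 = pvUnvis V := by
  unfold pvUnvis
  have hsplit := countP_split_pq (fun y => decide (y ∉ V)) (fun y => !(y == nx))
    (PySem.List.pyRange (-pvINF) (pvINF + 1) 1)
  have h1 : (PySem.List.pyRange (-pvINF) (pvINF + 1) 1).countP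
        (fun y => decide (y ∉ V) && !(y == nx))
      = (PySem.List.pyRange (-pvINF) (pvINF + 1) 1).countP
        (fun y => decide (y ∉ V.insert nx)) := by
    apply countP_congr_mem
    intro y _
    by_cases hy : y = nx
    · subst hy
      simp [hnV, pvSet_mem_add]
    · by_cases hV : y ∈ V <;> simp [hy, hV, pvSet_mem_add]
      rw [Bool.eq_iff_iff, beq_iff_eq, decide_eq_true_eq]
      exact ⟨fun h => h.symm, fun h => h.symm⟩
  have h2 : (PySem.List.pyRange (-pvINF) (pvINF + 1) 1).countP
        (fun y => decide (y ∉ V) && !(!(y == nx)))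
      = (PySem.List.pyRange (-pvINF) (pvINF + 1) 1).countP (fun y => y == nx) := by
    apply countP_congr_mem
    intro y _
    by_cases hy : y = nx
    · subst hy; simp [hnV]
    · simp [hy]
  have h3 : (PySem.List.pyRange (-pvINF) (pvINF + 1) 1).countP (fun y => y == nx) = 1 :=
    countP_eq_single nx _ (PySem.List.nodup_pyRange_one _ _)
      (PySem.List.mem_pyRange_one.2 ⟨hstrip.1, by omega⟩)
  rw [h1, h2, h3] at hsplit
  push_cast
  omega

lemma pvCnt_pos (waters : List Int) (d y : Int)
    (hstrip : -pvINF ≤ y ∧ y ≤ pvINF) (hw : y ∉ waters)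
    (hdm : pvDmin y (pvEff waters) = d) : 1 ≤ pvCnt waters d := by
  unfold pvCnt
  have : 0 < (PySem.List.pyRange (-pvINF) (pvINF + 1) 1).countP
      (fun z => decide (z ∉ waters ∧ pvDmin z (pvEff waters) = d)) := by
    rw [List.countP_pos_iff]
    exact ⟨y, PySem.List.mem_pyRange_one.2 ⟨hstrip.1, by omega⟩, by simp [hw, hdm]⟩
  omega

lemma pvCnt_zero_no_witness (waters : List Int) (d : Int) (h : pvCnt waters d = 0) :
    ∀ y : Int, -pvINF ≤ y → y ≤ pvINF → y ∉ waters → pvDmin y (pvEff waters) ≠ d := by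
  intro y h1 h2 h3 h4
  have := pvCnt_pos waters d y ⟨h1, h2⟩ h3 h4
  omega

lemma mem_waters_of_mem_eff (waters : List Int) (e : Int) (he : e ∈ pvEff waters) :
    e ∈ waters := ((mem_pvEff waters e).1 he).1

-- a cell at distance d ≥ 2 has a neighbour at distance d - 1
lemma pvLevel_pred (waters : List Int) (d y : Int) (hd : 2 ≤ d)
    (hstrip : -pvINF ≤ y ∧ y ≤ pvINF) (hw : y ∉ waters)
    (hdm : pvDmin y (pvEff waters) = d) :
    ∃ y' : Int, (-pvINF ≤ y' ∧ y' ≤ pvINF) ∧ y' ∉ waters ∧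
      pvDmin y' (pvEff waters) = d - 1 ∧ (y' = y - 1 ∨ y' = y + 1) := by
  have hne : pvEff waters ≠ [] := by
    intro h
    rw [h] at hdm
    simp [pvDmin] at hdm
    omega
  obtain ⟨e, he, heq⟩ := pvDmin_mem y (pvEff waters) hne
  have hbe := (mem_pvEff waters e).1 he
  have habs : y - e = d ∨ e - y = d := by
    rw [hdm] at heq
    simp only [Int.abs_eq_natAbs] at heq
    omega
  -- step one cell towards e
  set y' := if e ≤ y then y - 1 else y + 1 with hy'
  have hadj : y' = y - 1 ∨ y' = y + 1 := by
    by_cases h : e ≤ y <;> simp [hy', h]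
  have hay' : |y' - e| = d - 1 := by
    by_cases h : e ≤ y <;> simp only [hy', h, if_true, if_false] <;>
      simp only [Int.abs_eq_natAbs] <;> omega
  have hle : pvDmin y' (pvEff waters) ≤ d - 1 := by
    have := pvDmin_le y' (pvEff waters) e he
    omega
  have hge : d - 1 ≤ pvDmin y' (pvEff waters) := by
    have := (pvDmin_adj y y' (pvEff waters) hne hadj).1
    omega
  have hdm' : pvDmin y' (pvEff waters) = d - 1 := le_antisymm hle hge
  have hstrip' : -pvINF ≤ y' ∧ y' ≤ pvINF := by
    rcases habs with h | h <;> by_cases hc : e ≤ y <;>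
      simp only [hy', hc, if_true, if_false] <;>
      constructor <;> omega
  have hw' : y' ∉ waters := by
    intro hmem
    have : y' ∈ pvEff waters := (mem_pvEff waters y').2 ⟨hmem, by omega, by omega⟩
    have := pvDmin_eq_zero y' (pvEff waters) this
    omega
  refine ⟨y', hstrip', hw', hdm', ?_⟩
  by_cases h : e ≤ y <;> simp [hy', h]

lemma pvCnt_mono_zero (waters : List Int) (d : Int) (hd : 1 ≤ d)
    (h : pvCnt waters d = 0) : ∀ n : Nat, pvCnt waters (d + n) = 0 := by
  intro n
  induction n with
  | zero => simpa using h
  | succ n ih =>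
    by_contra hne
    have hpos : 0 < (PySem.List.pyRange (-pvINF) (pvINF + 1) 1).countP
        (fun z => decide (z ∉ waters ∧ pvDmin z (pvEff waters) = d + (n + 1 : Nat))) := by
      have h0 : 0 ≤ pvCnt waters (d + (n + 1 : Nat)) := pvCnt_nonneg _ _
      unfold pvCnt at hne h0
      omega
    rw [List.countP_pos_iff] at hpos
    obtain ⟨y, hyr, hyp⟩ := hpos
    simp only [decide_eq_true_eq] at hyp
    have hyr' := PySem.List.mem_pyRange_one.1 hyr
    obtain ⟨y', hs', hw', hdm', _⟩ := pvLevel_pred waters (d + (n + 1 : Nat)) y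
      (by push_cast; omega) ⟨hyr'.1, by omega⟩ hyp.1 hyp.2
    have : pvDmin y' (pvEff waters) ≠ d + n := by
      apply pvCnt_zero_no_witness waters (d + n) ih y' hs'.1 hs'.2 hw'
    have : (d + (n + 1 : Nat) - 1 : Int) = d + n := by push_cast; ring
    omega

lemma pvCnt_high_zero (waters : List Int) (d : Int) (hd : 2 * pvINF + 1 < d) :
    pvCnt waters d = 0 := by
  unfold pvCnt
  have : (PySem.List.pyRange (-pvINF) (pvINF + 1) 1).countP
      (fun z => decide (z ∉ waters ∧ pvDmin z (pvEff waters) = d)) = 0 := by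
    apply List.countP_eq_zero.2
    intro y hy
    have hyr := PySem.List.mem_pyRange_one.1 hy
    simp only [decide_eq_true_eq, not_and]
    intro _ hdm
    cases heff : pvEff waters with
    | nil =>
      rw [heff] at hdm
      simp [pvDmin] at hdm
      have hpv : pvINF = 100100000 := rfl
      omega
    | cons a tail =>
      have ha : a ∈ pvEff waters := by rw [heff]; simp
      have hba := (mem_pvEff waters a).1 ha
      have hle := pvDmin_le y (pvEff waters) a ha
      rw [hdm] at hle
      simp only [Int.abs_eq_natAbs] at hle
      have hpv : pvINF = 100100000 := rfl
      omega
  omega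

lemma pvSeed_adj (waters : List Int) (y : Int) (hdm : pvDmin y (pvEff waters) = 1)
    (hne : pvEff waters ≠ []) :
    ∃ w ∈ waters, y = w - 1 ∨ y = w + 1 := by
  obtain ⟨e, he, heq⟩ := pvDmin_mem y (pvEff waters) hne
  refine ⟨e, mem_waters_of_mem_eff waters e he, ?_⟩
  rw [hdm] at heq
  simp only [Int.abs_eq_natAbs] at heq
  omega

-- a freshly claimable cell next to a frontier entry is at distance exactly d
lemma pvClaimDist (waters : List Int) (d x nx : Int) (hne : pvEff waters ≠ [])
    (hx : (d = 1 ∧ x ∈ waters) ∨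
      ((-pvINF ≤ x ∧ x ≤ pvINF) ∧ x ∉ waters ∧ pvDmin x (pvEff waters) = d - 1))
    (hadj : nx = x - 1 ∨ nx = x + 1)
    (hstrip : -pvINF ≤ nx ∧ nx ≤ pvINF)
    (hnw : nx ∉ waters)
    (hnlt : ¬ pvDmin nx (pvEff waters) < d) :
    pvDmin nx (pvEff waters) = d := by
  rcases hx with ⟨rfl, hxw⟩ | ⟨hxs, hxw, hxd⟩
  · -- seed: x is a water and nx is next to it, so dist nx ≤ 1
    have hxe : x ∈ pvEff waters := by
      apply (mem_pvEff waters x).2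
      refine ⟨hxw, ?_, ?_⟩ <;> rcases hadj with rfl | rfl <;> omega
    have h1 := pvDmin_le nx (pvEff waters) x hxe
    have h2 : |nx - x| = 1 := by
      rcases hadj with rfl | rfl <;> simp only [Int.abs_eq_natAbs] <;> omega
    omega
  · have := (pvDmin_adj x nx (pvEff waters) hne (by rcases hadj with rfl | rfl <;> simp)).2
    omega

lemma pvGo_k0 (fuel : Nat) (res : Int) (V : Std.HashSet Int) (q : List (Int × Int)) :
    solutionGo fuel res 0 V q = res := by
  cases fuel with
  | zero => rfl
  | succ f => simp [solutionGo]

lemma solutionGo_cons (fuel : Nat) (result K : Int) (visited : Std.HashSet Int)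
    (x c : Int) (q : List (Int × Int)) :
    solutionGo (fuel + 1) result K visited ((x, c) :: q) =
      (if K = 0 then result
       else
        if (-pvINF ≤ x - 1 ∧ x - 1 ≤ pvINF) ∧ ¬ visited.contains (x - 1) then
          if K - 1 = 0 then result + c
          else
            if (-pvINF ≤ x + 1 ∧ x + 1 ≤ pvINF) ∧
                ¬ (visited.insert (x - 1)).contains (x + 1) then
              solutionGo fuel (result + c + c) (K - 2)
                ((visited.insert (x - 1)).insert (x + 1))
                (q ++ [(x - 1, c + 1)] ++ [(x + 1, c + 1)])
            else
              solutionGo fuel (result + c) (K - 1)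
                (visited.insert (x - 1)) (q ++ [(x - 1, c + 1)])
        else
          if (-pvINF ≤ x + 1 ∧ x + 1 ≤ pvINF) ∧ ¬ visited.contains (x + 1) then
            solutionGo fuel (result + c) (K - 1)
              (visited.insert (x + 1)) (q ++ [(x + 1, c + 1)])
          else
            solutionGo fuel result K visited q) := rfl

lemma solutionGo_nil (fuel : Nat) (result K : Int) (visited : Std.HashSet Int) :
    solutionGo (fuel + 1) result K visited [] = result := by
  show (if K = 0 then result else result) = result
  split_ifs <;> rfl

lemma pvGo_ineffective : ∀ (fuel : Nat) (res k : Int) (V : Std.HashSet Int) (q : List (Int × Int)),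
    (∀ p ∈ q, p.1 < -pvINF - 1 ∨ pvINF + 1 < p.1) →
    solutionGo fuel res k V q = res := by
  intro fuel
  induction fuel with
  | zero => intro res k V q _; rfl
  | succ f ih =>
    intro res k V q hq
    match q with
    | [] => exact solutionGo_nil f res k V
    | (x, c) :: q' =>
      rw [solutionGo_cons]
      have hx := hq (x, c) (by simp)
      simp only at hx
      by_cases hk : k = 0
      · rw [if_pos hk]
      · rw [if_neg hk]
        rw [if_neg (by
          rintro ⟨⟨h1, h2⟩, _⟩
          rcases hx with h | h <;> omega)]
        rw [if_neg (by
          rintro ⟨⟨h1, h2⟩, _⟩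
          rcases hx with h | h <;> omega)]
        exact ih res k V q' (fun p hp => hq p (by simp [hp]))

lemma pvRem_pos (waters : List Int) (d : Int) (P : List Int) (y : Int)
    (hstrip : -pvINF ≤ y ∧ y ≤ pvINF) (hw : y ∉ waters)
    (hdm : pvDmin y (pvEff waters) = d) (hyP : y ∉ P) : 1 ≤ pvRem waters d P := by
  unfold pvRem
  have : 0 < (PySem.List.pyRange (-pvINF) (pvINF + 1) 1).countP
      (fun z => decide ((z ∉ waters ∧ pvDmin z (pvEff waters) = d) ∧ z ∉ P)) := by
    rw [List.countP_pos_iff]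
    exact ⟨y, PySem.List.mem_pyRange_one.2 ⟨hstrip.1, by omega⟩, by simp [hw, hdm, hyP]⟩
  omega

lemma pvPart_zero_of_done (waters : List Int) (d : Int) (P : List Int) (k : Int)
    (hk : 0 ≤ k) (hd : 1 ≤ d) (hrem : pvRem waters d P = 0) (hcnt : pvCnt waters d = 0) :
    pvPart waters d P k = 0 := by
  unfold pvPart
  rw [hrem, min_eq_right hk]
  rw [pvTsum_cnt_zero _ _ _ _ (by omega) (fun d' hd' => by
    have := pvCnt_mono_zero waters d hd hcnt (d' - d).toNat
    rwa [show d + ((d' - d).toNat : Int) = d' from by omega] at this)]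
  ring

lemma pvPart_step (waters : List Int) (d : Int) (P : List Int) (k nx : Int)
    (hk : 1 ≤ k)
    (hstrip : -pvINF ≤ nx ∧ nx ≤ pvINF)
    (hpred : nx ∉ waters ∧ pvDmin nx (pvEff waters) = d) (hnp : nx ∉ P) :
    pvPart waters d P k = d + pvPart waters d (nx :: P) (k - 1) := by
  have hins := pvRem_insert waters d P nx hstrip hpred hnp
  have hpos := pvRem_nonneg waters d (nx :: P)
  unfold pvPart
  have hm : min k (pvRem waters d P) = min (k - 1) (pvRem waters d (nx :: P)) + 1 := by omega
  rw [hm, show k - (min (k - 1) (pvRem waters d (nx :: P)) + 1)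
      = k - 1 - min (k - 1) (pvRem waters d (nx :: P)) from by ring]
  ring

lemma pvPart_last (waters : List Int) (d : Int) (P : List Int) (k : Int)
    (hk : 1 ≤ k) (hle : k ≤ pvRem waters d P) :
    pvPart waters d P k = k * d := by
  unfold pvPart
  rw [min_eq_left hle]
  rw [show k - k = 0 from by ring, pvTsum_k_zero _ (pvCnt_nonneg waters)]
  ring

lemma pvPart_next (waters : List Int) (d : Int) (P : List Int) (k : Int)
    (hd : 1 ≤ d) (hk : 0 ≤ k) (hrem : pvRem waters d P = 0) :
    pvPart waters d P k = pvPart waters (d + 1) [] k := by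
  have hpv : pvINF = 100100000 := rfl
  unfold pvPart
  rw [hrem, min_eq_right hk, pvRem_nil]
  by_cases hcase : d ≤ 2 * pvINF
  · rw [show (2 * pvINF + 1 - d).toNat = (2 * pvINF + 1 - (d + 1)).toNat + 1 from by omega,
      pvTsum_succ]
    ring
  · have hz : pvCnt waters (d + 1) = 0 := pvCnt_high_zero waters (d + 1) (by omega)
    rw [hz, min_eq_right hk,
      show (2 * pvINF + 1 - d).toNat = 0 from by omega,
      show (2 * pvINF + 1 - (d + 1)).toNat = 0 from by omega]
    show (0 : Int) * d + 0 = 0 * (d + 1) + 0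
    ring

structure PvInv (waters : List Int) (d : Int) (V : Std.HashSet Int)
    (Rem App : List (Int × Int)) (P : List Int) : Prop where
  hne : pvEff waters ≠ []
  hd : 1 ≤ d
  hV : ∀ z : Int, z ∈ V ↔ (z ∈ waters ∨
    ((-pvINF ≤ z ∧ z ≤ pvINF) ∧ z ∉ waters ∧ pvDmin z (pvEff waters) < d) ∨ z ∈ P)
  hPnd : P.Nodup
  hP : ∀ y ∈ P, (-pvINF ≤ y ∧ y ≤ pvINF) ∧ y ∉ waters ∧ pvDmin y (pvEff waters) = d
  hRem : ∀ p ∈ Rem, p.2 = d ∧ ((d = 1 ∧ p.1 ∈ waters) ∨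
    ((-pvINF ≤ p.1 ∧ p.1 ≤ pvINF) ∧ p.1 ∉ waters ∧ pvDmin p.1 (pvEff waters) = d - 1))
  hApp : ∀ p ∈ App, p.2 = d + 1 ∧ p.1 ∈ P
  hApp2 : ∀ y ∈ P, (y, d + 1) ∈ App
  hCompl : ∀ y : Int, -pvINF ≤ y → y ≤ pvINF → y ∉ waters →
    pvDmin y (pvEff waters) = d → y ∉ P →
    ∃ x₀, (x₀, d) ∈ Rem ∧ (y = x₀ - 1 ∨ y = x₀ + 1)

lemma pvPart_k0 (waters : List Int) (d : Int) (P : List Int) : pvPart waters d P 0 = 0 := by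
  unfold pvPart
  rw [min_eq_left (pvRem_nonneg waters d P), show (0:Int) - 0 = 0 from by ring,
    pvTsum_k_zero _ (pvCnt_nonneg waters)]
  ring

lemma pvClaimFacts (waters : List Int) (d x nx : Int) (V : Std.HashSet Int) (P : List Int)
    (hne : pvEff waters ≠ [])
    (hV : ∀ z : Int, z ∈ V ↔ (z ∈ waters ∨
      ((-pvINF ≤ z ∧ z ≤ pvINF) ∧ z ∉ waters ∧ pvDmin z (pvEff waters) < d) ∨ z ∈ P))
    (hx : (d = 1 ∧ x ∈ waters) ∨
      ((-pvINF ≤ x ∧ x ≤ pvINF) ∧ x ∉ waters ∧ pvDmin x (pvEff waters) = d - 1))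
    (hadj : nx = x - 1 ∨ nx = x + 1)
    (hstrip : -pvINF ≤ nx ∧ nx ≤ pvINF)
    (hnV : nx ∉ V) :
    nx ∉ waters ∧ nx ∉ P ∧ pvDmin nx (pvEff waters) = d := by
  have hw : nx ∉ waters := fun h => hnV ((hV nx).2 (Or.inl h))
  have hp : nx ∉ P := fun h => hnV ((hV nx).2 (Or.inr (Or.inr h)))
  have hlt : ¬ pvDmin nx (pvEff waters) < d :=
    fun h => hnV ((hV nx).2 (Or.inr (Or.inl ⟨hstrip, hw, h⟩)))
  exact ⟨hw, hp, pvClaimDist waters d x nx hne hx hadj hstrip hw hlt⟩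

lemma pvGo_main : ∀ (fuel : Nat) (waters : List Int) (d res k : Int) (V : Std.HashSet Int)
    (Rem App : List (Int × Int)) (P : List Int),
    PvInv waters d V Rem App P → 1 ≤ k →
    2 * pvUnvis V + ((Rem ++ App).length : Int) + 1 ≤ (fuel : Int) →
    solutionGo fuel res k V (Rem ++ App) = res + pvPart waters d P k := by
  intro fuel
  induction fuel using Nat.strong_induction_on with
  | _ fuel ih =>
  intro waters d res k V Rem App P hinv hk hfuel
  have huv := pvUnvis_nonneg V
  obtain ⟨f, rfl⟩ : ∃ f, fuel = f + 1 := by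
    refine ⟨fuel - 1, ?_⟩
    have h0 : (0:Int) ≤ ((Rem ++ App).length : Int) := Int.natCast_nonneg _
    omega
  have main : ∀ (d : Int) (res k : Int) (x c : Int) (Rem' App : List (Int × Int)) (P : List Int),
      PvInv waters d V ((x, c) :: Rem') App P → 1 ≤ k →
      2 * pvUnvis V + ((((x, c) :: Rem') ++ App).length : Int) + 1 ≤ ((f + 1 : Nat) : Int) →
      solutionGo (f + 1) res k V (((x, c) :: Rem') ++ App) = res + pvPart waters d P k := by
    clear hinv hfuel hk Rem App P res k d
    intro d res k x c Rem' App P hinv hk hfuel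
    obtain ⟨hcd, hxcase⟩ := hinv.hRem (x, c) (by simp)
    simp only at hcd hxcase
    subst c
    rw [List.cons_append, solutionGo_cons, if_neg (by omega : ¬ k = 0)]
    simp only [List.length_cons, List.length_append] at hfuel
    push_cast at hfuel
    by_cases hC1 : (-pvINF ≤ x - 1 ∧ x - 1 ≤ pvINF) ∧ ¬ V.contains (x - 1) = true
    · rw [if_pos hC1]
      obtain ⟨hs1, hnc1⟩ := hC1
      have hnV1 : x - 1 ∉ V := fun hm => hnc1 ((pvSet_contains_iff V (x - 1)).2 hm)
      obtain ⟨hw1, hP1, hd1⟩ := pvClaimFacts waters d x (x - 1) V P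
        hinv.hne hinv.hV hxcase (Or.inl rfl) hs1 hnV1
      have hrem1 : 1 ≤ pvRem waters d P := pvRem_pos waters d P (x - 1) hs1 hw1 hd1 hP1
      have huv1 := pvUnvis_insert V (x - 1) hs1 hnV1
      by_cases hk1 : k - 1 = 0
      · rw [if_pos hk1]
        have hk' : k = 1 := by omega
        subst hk'
        rw [pvPart_last waters d P 1 le_rfl hrem1]
        ring
      · rw [if_neg hk1]
        by_cases hC2 : (-pvINF ≤ x + 1 ∧ x + 1 ≤ pvINF) ∧
            ¬ (V.insert (x - 1)).contains (x + 1) = true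
        · rw [if_pos hC2]
          obtain ⟨hs2, hnc2⟩ := hC2
          have hnVa2 : x + 1 ∉ V.insert (x - 1) :=
            fun hm => hnc2 ((pvSet_contains_iff _ _).2 hm)
          have hnV2 : x + 1 ∉ V := fun hm => hnVa2 ((pvSet_mem_add _ _ _).2 (Or.inl hm))
          obtain ⟨hw2, hP2, hd2⟩ := pvClaimFacts waters d x (x + 1) V P
            hinv.hne hinv.hV hxcase (Or.inr rfl) hs2 hnV2
          have hP2' : x + 1 ∉ (x - 1) :: P := by
            intro h
            rcases List.mem_cons.1 h with h' | h'
            · omega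
            · exact hP2 h'
          have huv2 := pvUnvis_insert (V.insert (x - 1)) (x + 1) hs2 hnVa2
          rw [show (Rem' ++ App) ++ [(x - 1, d + 1)] ++ [(x + 1, d + 1)]
              = Rem' ++ (App ++ [(x - 1, d + 1)] ++ [(x + 1, d + 1)]) from by
            simp [List.append_assoc]]
          have hpart : pvPart waters d P k
              = d + d + pvPart waters d ((x + 1) :: (x - 1) :: P) (k - 2) := by
            rw [pvPart_step waters d P k (x - 1) (by omega) hs1 ⟨hw1, hd1⟩ hP1,
              pvPart_step waters d ((x - 1) :: P) (k - 1) (x + 1) (by omega) hs2 ⟨hw2, hd2⟩ hP2',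
              show k - 1 - 1 = k - 2 from by ring]
            ring
          have hinv'' : PvInv waters d ((V.insert (x - 1)).insert (x + 1))
              Rem' (App ++ [(x - 1, d + 1)] ++ [(x + 1, d + 1)]) ((x + 1) :: (x - 1) :: P) := by
            refine ⟨hinv.hne, hinv.hd, ?_, ?_, ?_, ?_, ?_, ?_, ?_⟩
            · intro z
              rw [pvSet_mem_add, pvSet_mem_add, hinv.hV z]
              simp only [List.mem_cons]
              constructor
              · rintro ((h | rfl) | rfl)
                · rcases h with h | h | h
                  · exact Or.inl h
                  · exact Or.inr (Or.inl h)
                  · exact Or.inr (Or.inr (Or.inr (Or.inr h)))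
                · exact Or.inr (Or.inr (Or.inr (Or.inl rfl)))
                · exact Or.inr (Or.inr (Or.inl rfl))
              · rintro (h | h | h | h | h)
                · exact Or.inl (Or.inl (Or.inl h))
                · exact Or.inl (Or.inl (Or.inr (Or.inl h)))
                · exact Or.inr h
                · exact Or.inl (Or.inr h)
                · exact Or.inl (Or.inl (Or.inr (Or.inr h)))
            · exact List.nodup_cons.2 ⟨hP2', List.nodup_cons.2 ⟨hP1, hinv.hPnd⟩⟩
            · intro y hy
              rcases List.mem_cons.1 hy with rfl | hy
              · exact ⟨hs2, hw2, hd2⟩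
              rcases List.mem_cons.1 hy with rfl | hy
              · exact ⟨hs1, hw1, hd1⟩
              · exact hinv.hP y hy
            · exact fun p hp => hinv.hRem p (by simp [hp])
            · intro p hp
              rcases List.mem_append.1 hp with hp | hp
              · rcases List.mem_append.1 hp with hp | hp
                · obtain ⟨h1, h2⟩ := hinv.hApp p hp
                  exact ⟨h1, by simp [h2]⟩
                · simp only [List.mem_singleton] at hp
                  subst hp
                  exact ⟨rfl, by simp⟩
              · simp only [List.mem_singleton] at hp
                subst hp
                exact ⟨rfl, by simp⟩
            · intro y hy
              rcases List.mem_cons.1 hy with rfl | hy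
              · simp
              rcases List.mem_cons.1 hy with rfl | hy
              · simp
              · have := hinv.hApp2 y hy
                simp [this]
            · intro y hy1 hy2 hyw hyd hyP
              have hyP0 : y ∉ P := fun h => hyP (by simp [h])
              obtain ⟨x₀, hx₀, hadj⟩ := hinv.hCompl y hy1 hy2 hyw hyd hyP0
              rcases List.mem_cons.1 hx₀ with heq | hmem
              · exfalso
                have hx0 : x₀ = x := by
                  have := congrArg Prod.fst heq
                  simpa using this
                subst x₀
                apply hyP
                rcases hadj with rfl | rfl <;> simp
              · exact ⟨x₀, hmem, hadj⟩
          by_cases hk2 : k - 2 = 0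
          · rw [hk2, pvGo_k0, hpart, hk2, pvPart_k0]
            ring
          · rw [ih f (by omega) waters d (res + d + d) (k - 2) _ Rem' _ _ hinv''
              (by omega) (by
                simp only [List.length_append, List.length_cons, List.length_nil]
                push_cast
                omega)]
            rw [hpart]
            ring
        · rw [if_neg hC2]
          rw [show (Rem' ++ App) ++ [(x - 1, d + 1)] = Rem' ++ (App ++ [(x - 1, d + 1)]) from by
            simp [List.append_assoc]]
          have hinv' : PvInv waters d (V.insert (x - 1)) Rem'
              (App ++ [(x - 1, d + 1)]) ((x - 1) :: P) := by
            refine ⟨hinv.hne, hinv.hd, ?_, ?_, ?_, ?_, ?_, ?_, ?_⟩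
            · intro z
              rw [pvSet_mem_add, hinv.hV z]
              simp only [List.mem_cons]
              constructor
              · rintro (h | rfl)
                · rcases h with h | h | h
                  · exact Or.inl h
                  · exact Or.inr (Or.inl h)
                  · exact Or.inr (Or.inr (Or.inr h))
                · exact Or.inr (Or.inr (Or.inl rfl))
              · rintro (h | h | h | h)
                · exact Or.inl (Or.inl h)
                · exact Or.inl (Or.inr (Or.inl h))
                · exact Or.inr h
                · exact Or.inl (Or.inr (Or.inr h))
            · exact List.nodup_cons.2 ⟨hP1, hinv.hPnd⟩
            · intro y hy
              rcases List.mem_cons.1 hy with rfl | hy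
              · exact ⟨hs1, hw1, hd1⟩
              · exact hinv.hP y hy
            · exact fun p hp => hinv.hRem p (by simp [hp])
            · intro p hp
              rcases List.mem_append.1 hp with hp | hp
              · obtain ⟨h1, h2⟩ := hinv.hApp p hp
                exact ⟨h1, by simp [h2]⟩
              · simp only [List.mem_singleton] at hp
                subst hp
                exact ⟨rfl, by simp⟩
            · intro y hy
              rcases List.mem_cons.1 hy with rfl | hy
              · simp
              · have := hinv.hApp2 y hy
                simp [this]
            · intro y hy1 hy2 hyw hyd hyP
              have hyP0 : y ∉ P := fun h => hyP (by simp [h])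
              obtain ⟨x₀, hx₀, hadj⟩ := hinv.hCompl y hy1 hy2 hyw hyd hyP0
              rcases List.mem_cons.1 hx₀ with heq | hmem
              · exfalso
                have hx0 : x₀ = x := by
                  have := congrArg Prod.fst heq
                  simpa using this
                subst x₀
                rcases hadj with rfl | rfl
                · exact hyP (by simp)
                · -- x + 1 was not claimable, so it is already visited, hence in P
                  have hcont : (V.insert (x - 1)).contains (x + 1) = true := by
                    by_contra hc
                    exact hC2 ⟨⟨hy1, hy2⟩, hc⟩
                  have hmemadd := (pvSet_contains_iff _ _).1 hcont
                  rcases (pvSet_mem_add _ _ _).1 hmemadd with hmV | heq'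
                  · rcases (hinv.hV _).1 hmV with h | h | h
                    · exact hyw h
                    · omega
                    · exact hyP (by simp [h])
                  · omega
              · exact ⟨x₀, hmem, hadj⟩
          rw [ih f (by omega) waters d (res + d) (k - 1) _ Rem' _ _ hinv'
            (by omega) (by
              simp only [List.length_append, List.length_cons, List.length_nil]
              push_cast
              omega)]
          rw [pvPart_step waters d P k (x - 1) hk hs1 ⟨hw1, hd1⟩ hP1]
          ring
    · rw [if_neg hC1]
      by_cases hC2 : (-pvINF ≤ x + 1 ∧ x + 1 ≤ pvINF) ∧
          ¬ V.contains (x + 1) = true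
      · rw [if_pos hC2]
        obtain ⟨hs2, hnc2⟩ := hC2
        have hnV2 : x + 1 ∉ V := fun hm => hnc2 ((pvSet_contains_iff V (x + 1)).2 hm)
        obtain ⟨hw2, hP2, hd2⟩ := pvClaimFacts waters d x (x + 1) V P
          hinv.hne hinv.hV hxcase (Or.inr rfl) hs2 hnV2
        have hrem2 : 1 ≤ pvRem waters d P := pvRem_pos waters d P (x + 1) hs2 hw2 hd2 hP2
        have huv2 := pvUnvis_insert V (x + 1) hs2 hnV2
        rw [show (Rem' ++ App) ++ [(x + 1, d + 1)] = Rem' ++ (App ++ [(x + 1, d + 1)]) from by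
          simp [List.append_assoc]]
        by_cases hk1 : k - 1 = 0
        · rw [hk1, pvGo_k0]
          have hk' : k = 1 := by omega
          subst hk'
          rw [pvPart_last waters d P 1 le_rfl hrem2]
          ring
        · have hinv' : PvInv waters d (V.insert (x + 1)) Rem'
              (App ++ [(x + 1, d + 1)]) ((x + 1) :: P) := by
            refine ⟨hinv.hne, hinv.hd, ?_, ?_, ?_, ?_, ?_, ?_, ?_⟩
            · intro z
              rw [pvSet_mem_add, hinv.hV z]
              simp only [List.mem_cons]
              constructor
              · rintro (h | rfl)
                · rcases h with h | h | h
                  · exact Or.inl h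
                  · exact Or.inr (Or.inl h)
                  · exact Or.inr (Or.inr (Or.inr h))
                · exact Or.inr (Or.inr (Or.inl rfl))
              · rintro (h | h | h | h)
                · exact Or.inl (Or.inl h)
                · exact Or.inl (Or.inr (Or.inl h))
                · exact Or.inr h
                · exact Or.inl (Or.inr (Or.inr h))
            · exact List.nodup_cons.2 ⟨hP2, hinv.hPnd⟩
            · intro y hy
              rcases List.mem_cons.1 hy with rfl | hy
              · exact ⟨hs2, hw2, hd2⟩
              · exact hinv.hP y hy
            · exact fun p hp => hinv.hRem p (by simp [hp])
            · intro p hp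
              rcases List.mem_append.1 hp with hp | hp
              · obtain ⟨h1, h2⟩ := hinv.hApp p hp
                exact ⟨h1, by simp [h2]⟩
              · simp only [List.mem_singleton] at hp
                subst hp
                exact ⟨rfl, by simp⟩
            · intro y hy
              rcases List.mem_cons.1 hy with rfl | hy
              · simp
              · have := hinv.hApp2 y hy
                simp [this]
            · intro y hy1 hy2 hyw hyd hyP
              have hyP0 : y ∉ P := fun h => hyP (by simp [h])
              obtain ⟨x₀, hx₀, hadj⟩ := hinv.hCompl y hy1 hy2 hyw hyd hyP0
              rcases List.mem_cons.1 hx₀ with heq | hmem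
              · exfalso
                have hx0 : x₀ = x := by
                  have := congrArg Prod.fst heq
                  simpa using this
                subst x₀
                rcases hadj with rfl | rfl
                · -- x - 1 was not claimable, so it is visited, hence in P
                  have hcont : V.contains (x - 1) = true := by
                    by_contra hc
                    exact hC1 ⟨⟨hy1, hy2⟩, hc⟩
                  have hmV := (pvSet_contains_iff _ _).1 hcont
                  rcases (hinv.hV _).1 hmV with h | h | h
                  · exact hyw h
                  · omega
                  · exact hyP (by simp [h])
                · exact hyP (by simp)
              · exact ⟨x₀, hmem, hadj⟩
          rw [ih f (by omega) waters d (res + d) (k - 1) _ Rem' _ _ hinv'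
            (by omega) (by
              simp only [List.length_append, List.length_cons, List.length_nil]
              push_cast
              omega)]
          rw [pvPart_step waters d P k (x + 1) hk hs2 ⟨hw2, hd2⟩ hP2]
          ring
      · rw [if_neg hC2]
        have hinv' : PvInv waters d V Rem' App P := by
          refine ⟨hinv.hne, hinv.hd, hinv.hV, hinv.hPnd, hinv.hP, ?_, hinv.hApp, hinv.hApp2, ?_⟩
          · exact fun p hp => hinv.hRem p (by simp [hp])
          · intro y hy1 hy2 hyw hyd hyP
            obtain ⟨x₀, hx₀, hadj⟩ := hinv.hCompl y hy1 hy2 hyw hyd hyP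
            rcases List.mem_cons.1 hx₀ with heq | hmem
            · exfalso
              have hx0 : x₀ = x := by
                have := congrArg Prod.fst heq
                simpa using this
              subst x₀
              rcases hadj with rfl | rfl
              · have hcont : V.contains (x - 1) = true := by
                  by_contra hc
                  exact hC1 ⟨⟨hy1, hy2⟩, hc⟩
                have hmV := (pvSet_contains_iff _ _).1 hcont
                rcases (hinv.hV _).1 hmV with h | h | h
                · exact hyw h
                · omega
                · exact hyP h
              · have hcont : V.contains (x + 1) = true := by
                  by_contra hc
                  exact hC2 ⟨⟨hy1, hy2⟩, hc⟩
                have hmV := (pvSet_contains_iff _ _).1 hcont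
                rcases (hinv.hV _).1 hmV with h | h | h
                · exact hyw h
                · omega
                · exact hyP h
            · exact ⟨x₀, hmem, hadj⟩
        exact ih f (by omega) waters d res k V Rem' App P hinv' hk (by
          simp only [List.length_append] at hfuel ⊢
          push_cast
          omega)
  rcases Rem with _ | ⟨⟨x, c⟩, Rem'⟩
  · rcases App with _ | ⟨⟨y0, c0⟩, App'⟩
    · rw [show (([] : List (Int × Int)) ++ []) = ([] : List (Int × Int)) from rfl, solutionGo_nil]
      have hP0 : P = [] := by
        cases P with
        | nil => rfl
        | cons y P' => exact absurd (hinv.hApp2 y (by simp)) (by simp)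
      have hcnt : pvCnt waters d = 0 := by
        unfold pvCnt
        have hz : (PySem.List.pyRange (-pvINF) (pvINF + 1) 1).countP
            (fun y => decide (y ∉ waters ∧ pvDmin y (pvEff waters) = d)) = 0 := by
          apply List.countP_eq_zero.2
          intro y hy
          have hyr := PySem.List.mem_pyRange_one.1 hy
          simp only [decide_eq_true_eq, not_and]
          intro hyw hyd
          obtain ⟨x₀, hx₀, -⟩ := hinv.hCompl y hyr.1 (by omega) hyw hyd (by rw [hP0]; simp)
          simp at hx₀
        omega
      have hrem : pvRem waters d P = 0 := by rw [hP0, pvRem_nil]; exact hcnt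
      rw [pvPart_zero_of_done waters d P k (by omega) hinv.hd hrem hcnt]
      ring
    · rw [List.nil_append]
      have hremz : pvRem waters d P = 0 := by
        unfold pvRem
        have hz : (PySem.List.pyRange (-pvINF) (pvINF + 1) 1).countP
            (fun y => decide ((y ∉ waters ∧ pvDmin y (pvEff waters) = d) ∧ y ∉ P)) = 0 := by
          apply List.countP_eq_zero.2
          intro y hy
          have hyr := PySem.List.mem_pyRange_one.1 hy
          simp only [decide_eq_true_eq, not_and]
          rintro ⟨hyw, hyd⟩ hyP
          obtain ⟨x₀, hx₀, -⟩ := hinv.hCompl y hyr.1 (by omega) hyw hyd hyP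
          simp at hx₀
        omega
      have hfull : ∀ z : Int, -pvINF ≤ z → z ≤ pvINF → z ∉ waters →
          pvDmin z (pvEff waters) = d → z ∈ P := by
        intro z h1 h2 h3 h4
        by_contra hz
        obtain ⟨x₀, hx₀, -⟩ := hinv.hCompl z h1 h2 h3 h4 hz
        simp at hx₀
      have hinv' : PvInv waters (d + 1) V ((y0, c0) :: App') [] [] := by
        refine ⟨hinv.hne, by have := hinv.hd; omega, ?_, List.nodup_nil, by simp, ?_, by simp,
          by simp, ?_⟩
        · intro z
          rw [hinv.hV z]
          constructor
          · rintro (h | h | h)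
            · exact Or.inl h
            · exact Or.inr (Or.inl ⟨h.1, h.2.1, by omega⟩)
            · obtain ⟨hs, hw, hdm⟩ := hinv.hP z h
              exact Or.inr (Or.inl ⟨hs, hw, by omega⟩)
          · rintro (h | h | h)
            · exact Or.inl h
            · obtain ⟨hs, hw, hdm⟩ := h
              by_cases hlt : pvDmin z (pvEff waters) < d
              · exact Or.inr (Or.inl ⟨hs, hw, hlt⟩)
              · have : pvDmin z (pvEff waters) = d := by omega
                exact Or.inr (Or.inr (hfull z hs.1 hs.2 hw this))
            · simp at h
        · intro p hp
          obtain ⟨h1, h2⟩ := hinv.hApp p hp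
          obtain ⟨hs, hw, hdm⟩ := hinv.hP p.1 h2
          exact ⟨h1, Or.inr ⟨hs, hw, by omega⟩⟩
        · intro y hy1 hy2 hyw hyd _
          obtain ⟨y', hs', hw', hdm', hadj'⟩ := pvLevel_pred waters (d + 1) y
            (by have := hinv.hd; omega) ⟨hy1, hy2⟩ hyw hyd
          have hyP' : y' ∈ P := hfull y' hs'.1 hs'.2 hw' (by omega)
          refine ⟨y', hinv.hApp2 y' hyP', ?_⟩
          rcases hadj' with h | h <;> omega
      have hstep := main (d + 1) res k y0 c0 App' [] [] hinv' hk (by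
        simp only [List.length_append, List.length_cons, List.length_nil] at hfuel ⊢
        push_cast at hfuel ⊢
        omega)
      rw [List.append_nil] at hstep
      rw [hstep, ← pvPart_next waters d P k hinv.hd (by omega) hremz]
  · exact main d res k x c Rem' App P hinv hk hfuel

lemma solution_eq_alt (N K : Int) (waters : List Int) (hK : 0 ≤ K) :
    solution N K waters = solution_alt N K waters := by
  show solutionGo (waters.length + 400400003) 0 K (Std.HashSet.ofList waters)
    (waters.map (fun w => (w, 1))) = _
  rcases eq_or_lt_of_le hK with rfl | hK1
  · rw [pvGo_k0]
    cases heff : pvEff waters with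
    | nil => rw [solution_alt_empty N 0 waters heff]
    | cons a tail =>
      rw [solution_alt_eq N 0 waters le_rfl a tail heff,
        pvTsum_k_zero _ (pvCnt_nonneg waters)]
  · cases heff : pvEff waters with
    | nil =>
      rw [solution_alt_empty N K waters heff, pvGo_ineffective]
      intro p hp
      obtain ⟨w, hw, rfl⟩ := List.mem_map.1 hp
      simp only
      by_contra hc
      push_neg at hc
      have : w ∈ pvEff waters := (mem_pvEff waters w).2 ⟨hw, by omega, by omega⟩
      rw [heff] at this
      simp at this
    | cons a tail =>
      have hne : pvEff waters ≠ [] := by rw [heff]; simp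
      have hinv : PvInv waters 1 (Std.HashSet.ofList waters)
          (waters.map (fun w => (w, 1))) [] [] := by
        refine ⟨hne, le_rfl, ?_, List.nodup_nil, by simp, ?_, by simp, by simp, ?_⟩
        · intro z
          rw [Std.HashSet.mem_ofList, List.contains_iff_mem]
          constructor
          · exact fun h => Or.inl h
          · rintro (h | h | h)
            · exact h
            · exfalso
              obtain ⟨hs, hw, hlt⟩ := h
              have hnn := pvDmin_nonneg z (pvEff waters) hne
              have hz0 : pvDmin z (pvEff waters) = 0 := by omega
              obtain ⟨e, he, heq⟩ := pvDmin_mem z (pvEff waters) hne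
              rw [hz0] at heq
              have : z = e := by simp only [Int.abs_eq_natAbs] at heq; omega
              subst this
              exact hw (mem_waters_of_mem_eff waters z he)
            · simp at h
        · intro p hp
          obtain ⟨w, hw, rfl⟩ := List.mem_map.1 hp
          exact ⟨rfl, Or.inl ⟨rfl, hw⟩⟩
        · intro y hy1 hy2 hyw hyd _
          obtain ⟨w, hw, hadj⟩ := pvSeed_adj waters y hyd hne
          exact ⟨w, List.mem_map.2 ⟨w, hw, rfl⟩, hadj⟩
      have hmain := pvGo_main (waters.length + 400400003) waters 1 0 K
        (Std.HashSet.ofList waters) (waters.map (fun w => (w, 1))) [] [] hinv hK1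
        (by
          have hle := pvUnvis_le (Std.HashSet.ofList waters)
          simp only [List.length_append, List.length_map, List.length_nil]
          push_cast
          omega)
      rw [List.append_nil] at hmain
      rw [hmain, solution_alt_eq N K waters hK a tail heff]
      rw [show (200200001 : Nat) = 200200000 + 1 from rfl, pvTsum_succ]
      unfold pvPart
      rw [pvRem_nil, show (2 * pvINF + 1 - 1).toNat = 200200000 from rfl]
      ring

-- ===== VERDICT (by name: the statement is the Claim_ definition above) =====
theorem solution_spec : Claim_equal_solution := by
  intro N K waters _ hpre
  unfold Spec_solution
  exact solution_eq_alt N K waters hpre
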